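-- pv_equiv track=rewrite | github.com/DiasFrazerGroup/lfb | src/lfb/alignment.py | get_query_to_target_mapping
-- ===== SOURCE A (Python) =====
-- from typing import List, Tuple, Union
--
-- def get_query_to_target_mapping(
--     cigar_tuples: List[Tuple[int, str]],
--     qstart: int,
--     qend: int,
--     tstart: int,
--     tend: int,
--     qlen: int,
-- ) -> List[int]:
--     """
--     Args:
--         cigar_tuples: List of (length, operation) from CIGAR string
--         qstart: Start index in the query sequence (1-based)
--         tstart: Start index in the target sequence (1-based)
--
--     Returns:
--         t_mapping: Mapping from query positions to target sequence positions
--     """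
--     q_pos = qstart - 1  # Position in qseq
--     t_pos = tstart - 1  # Position in tseq
--
--     # Overall length: qstart-1 + (qend-qstart+1) + (qlen - qend)
--     t_mapping = [None] * (qstart - 1)
--
--     for length, op in cigar_tuples:
--         if op == "M" or op == "=" or op == "X":
--             # Match or mismatch: advance both sequences
--             t_mapping.extend([t_pos + idx for idx in range(length)])
--             q_pos += length
--             t_pos += length
--         elif op == "I":
--             # Insertion in query, advance query
--             t_mapping.extend([None] * length)
--             q_pos += length
--         elif op == "D":
--             # Deletion in query, advance target
--             t_pos += length
--         else:
--             raise ValueError(f"Unsupported CIGAR operation: {op}")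
--     t_mapping.extend([None] * (qlen - qend))
--     assert len(t_mapping) == qlen
--
--     return t_mapping
-- ===== SOURCE B (Python) =====
-- def get_query_to_target_mapping(
--     cigar_tuples,
--     qstart,
--     qend,
--     tstart,
--     tend,
--     qlen,
-- ):
--     # Build the mapping back-to-front: start the target cursor at its final
--     # value (tstart-1 plus the total target advance) and walk the CIGAR in
--     # reverse, collecting segments, then flatten once.
--     t_pos = tstart - 1 + sum(l for l, op in cigar_tuples if op in ("M", "=", "X", "D"))
--     rev_segments = [[None] * (qlen - qend)]
--     for length, op in reversed(cigar_tuples):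
--         if op == "M" or op == "=" or op == "X":
--             t_pos -= length
--             rev_segments.append(list(range(t_pos, t_pos + length)))
--         elif op == "I":
--             rev_segments.append([None] * length)
--         elif op == "D":
--             t_pos -= length
--         else:
--             raise ValueError(f"Unsupported CIGAR operation: {op}")
--     rev_segments.append([None] * (qstart - 1))
--     t_mapping = []
--     for seg in reversed(rev_segments):
--         t_mapping.extend(seg)
--     assert len(t_mapping) == qlen
--     return t_mapping
-- ===== Notes on version B (the rewrite author's own statement) =====
-- stated objective: alternative
-- what changed: B walks the CIGAR in reverse with the target cursor started at its final value (tstart-1 plus the total target advance), collecting segments back-to-front and flattening once, instead of A's forward pass that grows the list op by op.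
import Mathlib
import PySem

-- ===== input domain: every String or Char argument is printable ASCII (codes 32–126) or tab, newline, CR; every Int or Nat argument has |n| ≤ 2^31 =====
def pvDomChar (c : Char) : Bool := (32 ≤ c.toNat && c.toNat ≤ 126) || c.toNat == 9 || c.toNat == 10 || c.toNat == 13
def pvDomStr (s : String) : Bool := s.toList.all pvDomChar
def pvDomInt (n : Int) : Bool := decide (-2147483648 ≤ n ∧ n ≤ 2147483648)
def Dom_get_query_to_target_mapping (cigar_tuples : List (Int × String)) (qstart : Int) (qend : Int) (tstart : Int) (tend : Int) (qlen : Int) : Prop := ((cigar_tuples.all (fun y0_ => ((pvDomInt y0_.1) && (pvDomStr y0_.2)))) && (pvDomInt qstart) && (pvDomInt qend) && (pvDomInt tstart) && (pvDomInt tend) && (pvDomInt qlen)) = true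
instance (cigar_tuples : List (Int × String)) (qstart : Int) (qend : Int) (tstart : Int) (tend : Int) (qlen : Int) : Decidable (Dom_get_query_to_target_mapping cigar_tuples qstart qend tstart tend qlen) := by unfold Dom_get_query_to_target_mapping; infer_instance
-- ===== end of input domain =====

-- B builds the mapping back-to-front (reverse CIGAR walk from the precomputed final target cursor,
-- segments flattened once) instead of A's forward pass growing the list op by op; return values agree on Pre_.

-- ===== PORT A =====
-- Loop body of A's 'for length, op in cigar_tuples' (state: q_pos, t_pos, t_mapping).
-- [None] * n is List.replicate n.toNat none (Python's list repetition clamps a negative count to empty — exact);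
-- [t_pos + idx for idx in range(length)] is (pyRange 0 length 1).map (t_pos + ·) — exact, empty for negative length.
def pvStepA (st : Int × Int × List (Option Int)) (p : Int × String) : Int × Int × List (Option Int) :=
  if p.2 == "M" || p.2 == "=" || p.2 == "X" then
    (st.1 + p.1, st.2.1 + p.1, st.2.2 ++ (PySem.List.pyRange 0 p.1 1).map (fun idx => some (st.2.1 + idx)))
  else if p.2 == "I" then
    (st.1 + p.1, st.2.1, st.2.2 ++ List.replicate p.1.toNat (none : Option Int))
  else if p.2 == "D" then
    (st.1, st.2.1 + p.1, st.2.2)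
  else st  -- Python raises ValueError here; such inputs are excluded by Pre_

def get_query_to_target_mapping (cigar_tuples : List (Int × String)) (qstart : Int) (qend : Int) (tstart : Int) (tend : Int) (qlen : Int) : List (Option Int) :=
  -- the closing 'assert len(t_mapping) == qlen' raises AssertionError when the lengths mismatch; excluded by Pre_
  (cigar_tuples.foldl pvStepA
    (qstart - 1, tstart - 1, List.replicate (qstart - 1).toNat (none : Option Int))).2.2
    ++ List.replicate (qlen - qend).toNat (none : Option Int)

-- ===== PORT B =====
-- Loop body of B's 'for length, op in reversed(cigar_tuples)' (state: t_pos, rev_segments).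
def pvStepB (st : Int × List (List (Option Int))) (p : Int × String) : Int × List (List (Option Int)) :=
  if p.2 == "M" || p.2 == "=" || p.2 == "X" then
    (st.1 - p.1, st.2 ++ [(PySem.List.pyRange (st.1 - p.1) (st.1 - p.1 + p.1) 1).map (fun x => some x)])
  else if p.2 == "I" then
    (st.1, st.2 ++ [List.replicate p.1.toNat (none : Option Int)])
  else if p.2 == "D" then
    (st.1 - p.1, st.2)
  else st  -- Python raises ValueError here; such inputs are excluded by Pre_

def get_query_to_target_mapping_alt (cigar_tuples : List (Int × String)) (qstart : Int) (qend : Int) (tstart : Int) (tend : Int) (qlen : Int) : List (Option Int) :=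
  -- sum(l for l, op in cigar_tuples if op in ("M", "=", "X", "D"))
  -- 'for seg in reversed(rev_segments): t_mapping.extend(seg)'; B's assert mirrors A's, excluded by Pre_
  (((cigar_tuples.reverse.foldl pvStepB
      (tstart - 1 + ((cigar_tuples.filter (fun p => (p.2 == "M" || p.2 == "=" || p.2 == "X") || p.2 == "D")).map Prod.fst).sum,
       [List.replicate (qlen - qend).toNat (none : Option Int)])).2
    ++ [List.replicate (qstart - 1).toNat (none : Option Int)]).reverse).foldl
    (fun out seg => out ++ seg) ([] : List (Option Int))

-- ===== PRECONDITION & SPEC =====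
-- Pre_ is exactly where Python A returns normally: every op is a supported CIGAR op (else ValueError) and the
-- produced length — max(qstart-1,0) leading Nones, max(length,0) slots per query-consuming op, max(qlen-qend,0)
-- trailing Nones — equals qlen (else the closing assert raises AssertionError).
def Pre_get_query_to_target_mapping (cigar_tuples : List (Int × String)) (qstart : Int) (qend : Int) (tstart : Int) (tend : Int) (qlen : Int) : Prop :=
  (∀ p ∈ cigar_tuples, p.2 = "M" ∨ p.2 = "=" ∨ p.2 = "X" ∨ p.2 = "I" ∨ p.2 = "D") ∧
  ((qstart - 1).toNat : Int) + (cigar_tuples.map (fun p => if p.2 = "D" then 0 else (p.1.toNat : Int))).sum + ((qlen - qend).toNat : Int) = qlen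
instance (cigar_tuples : List (Int × String)) (qstart : Int) (qend : Int) (tstart : Int) (tend : Int) (qlen : Int) : Decidable (Pre_get_query_to_target_mapping cigar_tuples qstart qend tstart tend qlen) := by unfold Pre_get_query_to_target_mapping; infer_instance

def pvWitness_get_query_to_target_mapping : (List (Int × String)) × Int × Int × Int × Int × Int :=
  ([(2, "M"), (1, "I"), (1, "D"), (1, "X")], 2, 5, 5, 9, 7)

def Spec_get_query_to_target_mapping (cigar_tuples : List (Int × String)) (qstart : Int) (qend : Int) (tstart : Int) (tend : Int) (qlen : Int) (out : List (Option Int)) : Prop := out = get_query_to_target_mapping_alt cigar_tuples qstart qend tstart tend qlen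
instance (cigar_tuples : List (Int × String)) (qstart : Int) (qend : Int) (tstart : Int) (tend : Int) (qlen : Int) (out : List (Option Int)) : Decidable (Spec_get_query_to_target_mapping cigar_tuples qstart qend tstart tend qlen out) := by unfold Spec_get_query_to_target_mapping; infer_instance

-- ===== CLAIM (what is proved, stated in full; the proofs are below) =====
def Claim_equal_get_query_to_target_mapping : Prop := ∀ (cigar_tuples : List (Int × String)) (qstart : Int) (qend : Int) (tstart : Int) (tend : Int) (qlen : Int), Dom_get_query_to_target_mapping cigar_tuples qstart qend tstart tend qlen → Pre_get_query_to_target_mapping cigar_tuples qstart qend tstart tend qlen → Spec_get_query_to_target_mapping cigar_tuples qstart qend tstart tend qlen (get_query_to_target_mapping cigar_tuples qstart qend tstart tend qlen)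

-- ===== LEMMAS AND PROOFS =====

-- the segment each op contributes, with the target cursor threaded forward
def pvSegs : List (Int × String) → Int → List (List (Option Int))
  | [], _ => []
  | p :: r, t =>
    if p.2 == "M" || p.2 == "=" || p.2 == "X" then
      (PySem.List.pyRange t (t + p.1) 1).map (fun x => (some x : Option Int)) :: pvSegs r (t + p.1)
    else if p.2 == "I" then
      List.replicate p.1.toNat (none : Option Int) :: pvSegs r t
    else if p.2 == "D" then
      pvSegs r (t + p.1)
    else pvSegs r t

-- how far an op advances the target cursor
def pvAdv (p : Int × String) : Int :=
  if (p.2 == "M" || p.2 == "=" || p.2 == "X") || p.2 == "D" then p.1 else 0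

@[simp] theorem pvRange_shift (t l : Int) :
    (PySem.List.pyRange 0 l 1).map (fun i => (some (t + i) : Option Int))
      = (PySem.List.pyRange t (t + l) 1).map (fun x => (some x : Option Int)) := by
  simp [PySem.List.pyRange_one, List.map_map, Function.comp_def]

theorem pvFoldl_append_eq {α : Type} (ls : List (List α)) (acc : List α) :
    ls.foldl (fun a b => a ++ b) acc = acc ++ ls.flatten := by
  induction ls generalizing acc with
  | nil => simp
  | cons x xs ih => simp [List.foldl_cons, ih]

theorem pvSumFilter_eq (ct : List (Int × String)) :
    ((ct.filter (fun p => (p.2 == "M" || p.2 == "=" || p.2 == "X") || p.2 == "D")).map Prod.fst).sum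
      = (ct.map pvAdv).sum := by
  induction ct with
  | nil => rfl
  | cons p r ih =>
    by_cases h : ((p.2 == "M" || p.2 == "=" || p.2 == "X") || p.2 == "D") = true
    · simp [h, pvAdv, ih]
    · simp [h, pvAdv, ih]

theorem pvFoldA (ct : List (Int × String)) :
    ∀ (q t : Int) (m : List (Option Int)),
      (ct.foldl pvStepA (q, t, m)).2.2 = m ++ (pvSegs ct t).flatten := by
  induction ct with
  | nil => intro q t m; simp [pvSegs]
  | cons p r ih =>
    intro q t m
    by_cases hM : (p.2 == "M" || p.2 == "=" || p.2 == "X") = true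
    · simp [List.foldl_cons, pvStepA, hM, pvSegs, ih]
    · by_cases hI : (p.2 == "I") = true
      · simp [List.foldl_cons, pvStepA, hM, hI, pvSegs, ih]
      · by_cases hD : (p.2 == "D") = true
        · simp [List.foldl_cons, pvStepA, hM, hI, hD, pvSegs, ih]
        · simp [List.foldl_cons, pvStepA, hM, hI, hD, pvSegs, ih]

theorem pvFoldB (ct : List (Int × String)) :
    ∀ (t : Int) (acc : List (List (Option Int))),
      ct.reverse.foldl pvStepB (t + (ct.map pvAdv).sum, acc) = (t, acc ++ (pvSegs ct t).reverse) := by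
  induction ct with
  | nil => intro t acc; simp [pvSegs]
  | cons p r ih =>
    intro t acc
    have hsum : t + ((p :: r).map pvAdv).sum = (t + pvAdv p) + (r.map pvAdv).sum := by
      simp [List.map_cons, List.sum_cons]; ring
    rw [List.reverse_cons, List.foldl_append, hsum, ih (t + pvAdv p) acc]
    by_cases hM : (p.2 == "M" || p.2 == "=" || p.2 == "X") = true
    · have hA : pvAdv p = p.1 := by simp [pvAdv, hM]
      simp [List.foldl_cons, pvStepB, hM, hA, pvSegs, List.append_assoc]
    · by_cases hI : (p.2 == "I") = true
      · have hA : pvAdv p = 0 := by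
          simp only [pvAdv]
          have : (p.2 == "D") = false := by
            cases h2 : (p.2 == "D") <;> simp_all
          simp [hM, this]
        simp [List.foldl_cons, pvStepB, hM, hI, hA, pvSegs, List.append_assoc]
      · by_cases hD : (p.2 == "D") = true
        · have hA : pvAdv p = p.1 := by simp [pvAdv, hD]
          simp [List.foldl_cons, pvStepB, hM, hI, hD, hA, pvSegs]
        · have hA : pvAdv p = 0 := by simp [pvAdv, hM, hD]
          simp [List.foldl_cons, pvStepB, hM, hI, hD, hA, pvSegs]

theorem pvAB (cigar_tuples : List (Int × String)) (qstart qend tstart tend qlen : Int) :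
    get_query_to_target_mapping cigar_tuples qstart qend tstart tend qlen
      = get_query_to_target_mapping_alt cigar_tuples qstart qend tstart tend qlen := by
  unfold get_query_to_target_mapping get_query_to_target_mapping_alt
  rw [pvSumFilter_eq, pvFoldA, pvFoldB cigar_tuples (tstart - 1)]
  simp [pvFoldl_append_eq, List.reverse_append]

-- ===== VERDICT (by name: the statement is the Claim_ definition above) =====
theorem get_query_to_target_mapping_spec : Claim_equal_get_query_to_target_mapping := by
  intro cigar_tuples qstart qend tstart tend qlen _ _
  unfold Spec_get_query_to_target_mapping
  exact pvAB cigar_tuples qstart qend tstart tend qlen
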